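-- pv_equiv track=rewrite | github.com/BashCtl/python-edabit | hard/list_up_a_list_of_strings_in_a_proper_way.py | sentence
-- ===== SOURCE A (Python) =====
-- def sentence(nouns):
--     def article(word):
--         return "an" if word[0] in 'aeiou' else "a"
--
--     nouns_with_articles = [f"{article(noun)} {noun}" for noun in nouns]
--
--     if len(nouns) > 2:
--         result = ', '.join(nouns_with_articles[:-1]) + f" and {nouns_with_articles[-1]}."
--     else:
--         result = f" and ".join(nouns_with_articles) + "."
--
--     return result.capitalize()
-- ===== SOURCE B (Python) =====
-- def sentence(nouns):
--     def fmt(noun):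
--         return ("an " if noun[0] in "aeiou" else "a ") + noun
--
--     items = [fmt(noun) for noun in nouns]
--     parts = []
--     if items:
--         parts.append(items[-1])
--         if len(items) >= 2:
--             parts.append(" and ")
--             parts.append(items[-2])
--         for item in reversed(items[:-2]):
--             parts.append(", ")
--             parts.append(item)
--     parts.reverse()
--     body = "".join(parts) + "."
--     return body[:1].upper() + body[1:].lower()
-- ===== Notes on version B (the rewrite author's own statement) =====
-- stated objective: alternative
-- what changed: Replaces A's len>2 branch with its two join passes plus slicing by a single back-to-front pass that appends the last item, then ' and '+second-last, then ', '+item for the rest, reverses the parts list and joins it once; capitalize is spelled as slice+upper/lower.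
-- outside the precondition, e.g. on sentence(['apple', '']): A raises IndexError, B raises IndexError
import Mathlib
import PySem

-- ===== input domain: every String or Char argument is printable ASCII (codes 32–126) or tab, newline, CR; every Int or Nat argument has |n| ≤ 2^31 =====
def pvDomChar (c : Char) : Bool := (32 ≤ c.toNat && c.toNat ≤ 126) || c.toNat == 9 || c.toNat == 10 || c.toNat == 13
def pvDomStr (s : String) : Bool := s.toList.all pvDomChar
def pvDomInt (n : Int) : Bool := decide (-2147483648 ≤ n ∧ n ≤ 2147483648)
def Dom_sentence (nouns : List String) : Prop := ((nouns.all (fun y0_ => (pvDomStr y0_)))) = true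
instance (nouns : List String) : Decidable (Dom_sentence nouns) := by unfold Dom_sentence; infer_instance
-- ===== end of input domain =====

-- B replaces A's length>2 branch with its two join passes by a single back-to-front loop
-- that places " and " / ", " directly, and spells capitalize as slice+upper/lower (objective: alternative).

-- ===== PORT A =====
-- str.capitalize(): first char uppercased, the rest lowercased (exact on ASCII)
def pyCapitalize (s : String) : String :=
  match s.toList with
  | [] => ""
  | c :: rest => String.ofList (PySem.Chars.upperChar c :: PySem.Chars.lower rest)

-- word[0] in 'aeiou'; the .getD is exact under Pre_sentence (every noun nonempty)
def sentenceArticle (word : String) : String :=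
  if "aeiou".toList.contains ((PySem.Str.pyGet? word 0).getD 'a') then "an" else "a"

def sentence (nouns : List String) : String :=
  let nwa := nouns.map (fun noun => sentenceArticle noun ++ " " ++ noun)
  let result :=
    if nouns.length > 2 then
      PySem.Str.join ", " (PySem.List.slice nwa none (some (-1))) ++ " and "
        ++ (PySem.List.pyGet? nwa (-1)).getD "" ++ "."
    else
      PySem.Str.join " and " nwa ++ "."
  pyCapitalize result

-- ===== PORT B =====
-- noun[0] in "aeiou"; the .getD is exact under Pre_sentence (every noun nonempty)
def sentenceFmt (noun : String) : String :=
  (if "aeiou".toList.contains ((PySem.Str.pyGet? noun 0).getD 'a') then "an " else "a ") ++ noun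

def sentence_alt (nouns : List String) : String :=
  let items := nouns.map sentenceFmt
  let parts : List String := []
  let parts :=
    if items ≠ [] then
      -- the two .getD are exact here: the branch guards guarantee the indices exist
      let parts := parts ++ [(PySem.List.pyGet? items (-1)).getD ""]
      let parts := if items.length ≥ 2 then
          parts ++ [" and "] ++ [(PySem.List.pyGet? items (-2)).getD ""]
        else parts
      ((PySem.List.slice items none (some (-2))).reverse).foldl
        (fun parts item => parts ++ [", "] ++ [item]) parts
    else parts
  let body := PySem.Str.join "" parts.reverse ++ "."
  PySem.Str.upper (PySem.Str.slice body none (some 1))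
    ++ PySem.Str.lower (PySem.Str.slice body (some 1) none)

-- ===== PRECONDITION & SPEC =====
-- Pre_ excludes lists containing an empty string: there A (and B) raise IndexError on word[0].
def Pre_sentence (nouns : List String) : Prop := ∀ s ∈ nouns, s ≠ ""
instance (nouns : List String) : Decidable (Pre_sentence nouns) := by unfold Pre_sentence; infer_instance

def pvWitness_sentence : List String := ["apple", "Bear", "umbrella"]

def Spec_sentence (nouns : List String) (out : String) : Prop := out = sentence_alt nouns
instance (nouns : List String) (out : String) : Decidable (Spec_sentence nouns out) := by unfold Spec_sentence; infer_instance

-- ===== CLAIM (what is proved, stated in full; the proofs are below) =====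
def Claim_equal_sentence : Prop := ∀ (nouns : List String), Dom_sentence nouns → Pre_sentence nouns → Spec_sentence nouns (sentence nouns)

-- ===== LEMMAS AND PROOFS =====

-- the two per-noun formatters agree at the character level
theorem fmt_toList (noun : String) :
    (sentenceFmt noun).toList = (sentenceArticle noun ++ " " ++ noun).toList := by
  unfold sentenceFmt sentenceArticle
  split_ifs <;> simp

-- capitalize: A's match form and B's slice/upper/lower form depend only on toList
theorem capitalize_toList (s : String) :
    (pyCapitalize s).toList
      = match s.toList with
        | [] => []
        | c :: rest => PySem.Chars.upperChar c :: PySem.Chars.lower rest := by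
  unfold pyCapitalize
  cases s.toList <;> simp [String.toList_ofList]

theorem alt_cap_toList (body : String) :
    (PySem.Str.upper (PySem.Str.slice body none (some 1))
      ++ PySem.Str.lower (PySem.Str.slice body (some 1) none)).toList
      = match body.toList with
        | [] => []
        | c :: rest => PySem.Chars.upperChar c :: PySem.Chars.lower rest := by
  simp [PySem.Str.toList_upper, PySem.Str.toList_lower, PySem.Str.toList_slice,
        PySem.Chars.slice_eq_listSlice,
        PySem.List.slice_to (b := (1 : Int)) _ (by norm_num),
        PySem.List.slice_from (a := (1 : Int)) _ (by norm_num)]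
  cases body.toList with
  | nil => rfl
  | cons c rest =>
      show (PySem.Chars.upper [c] ++ PySem.Chars.lower rest) = _
      rfl

-- xs[:-2] is dropLast.dropLast
theorem slice_to_neg_two {α : Type} (xs : List α) :
    PySem.List.slice xs none (some (-2)) = xs.dropLast.dropLast := by
  simp [PySem.List.slice, List.dropLast_eq_take, List.take_take]
  omega

-- join over a nonempty tail
theorem join_cons_ne (sep x : List Char) (l : List (List Char)) (h : l ≠ []) :
    PySem.Chars.join sep (x :: l) = x ++ sep ++ PySem.Chars.join sep l := by
  cases l with
  | nil => exact absurd rfl h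
  | cons q rest => exact PySem.Chars.join_cons_cons sep x q rest

-- ''.join concatenates
theorem join_empty_sep : ∀ (l : List (List Char)), PySem.Chars.join [] l = l.flatten := by
  intro l
  induction l with
  | nil => exact PySem.Chars.join_nil []
  | cons x t ih =>
      cases t with
      | nil => simp [PySem.Chars.join_singleton]
      | cons q r => rw [PySem.Chars.join_cons_cons, ih]; simp

-- the central identity: B's comma-separated parts flatten to A's join ", "
theorem core_flat : ∀ (pre : List String) (y : List Char),
    (pre.flatMap (fun it => [it.toList, ", ".toList])).flatten ++ y
      = PySem.Chars.join ", ".toList (pre.map String.toList ++ [y]) := by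
  intro pre
  induction pre with
  | nil => intro y; simp [PySem.Chars.join_singleton]
  | cons x p ih =>
      intro y
      rw [List.map_cons, List.cons_append, join_cons_ne _ _ _ (by simp), ← ih]
      simp

theorem sentence_spec' (nouns : List String) (h : Pre_sentence nouns) :
    sentence nouns = sentence_alt nouns := by
  rw [← String.toList_inj]
  unfold sentence sentence_alt
  rw [alt_cap_toList, capitalize_toList]
  have hbody : ∀ (resL bodyL : List Char), resL = bodyL →
      (match resL with
        | [] => ([] : List Char)
        | c :: rest => PySem.Chars.upperChar c :: PySem.Chars.lower rest)
      = (match bodyL with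
        | [] => ([] : List Char)
        | c :: rest => PySem.Chars.upperChar c :: PySem.Chars.lower rest) := by
    intro a b hab; rw [hab]
  apply hbody
  -- now: the pre-capitalize strings have the same characters
  match nouns with
  | [] => rfl
  | [a] =>
      simp [PySem.Chars.join_singleton, fmt_toList, PySem.List.pyGet?, PySem.List.pyIdx?,
            slice_to_neg_two]
  | [a, b] =>
      simp [PySem.Chars.join_cons_cons, PySem.Chars.join_singleton, fmt_toList,
            PySem.List.pyGet?, PySem.List.pyIdx?, slice_to_neg_two]
  | a :: b :: c :: rest =>
      rw [if_pos (by simp)]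
      dsimp only
      set M := List.map sentenceFmt (a :: b :: c :: rest) with hMdef
      have hMne : M ≠ [] := by simp [hMdef]
      have hMdne : M.dropLast ≠ [] := by
        simp [hMdef, List.dropLast_eq_take]
      set z := M.getLast hMne with hz
      set y := M.dropLast.getLast hMdne with hy
      set pre := M.dropLast.dropLast with hpre
      have hM : (pre ++ [y]) ++ [z] = M := by
        rw [hpre, hy, List.dropLast_append_getLast, hz, List.dropLast_append_getLast]
      -- B-side pieces
      have hg1 : PySem.List.pyGet? M (-1) = some z := by
        rw [← hM, PySem.List.pyGet?_neg_one_append_singleton]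
      have hg2 : PySem.List.pyGet? M (-2) = some y := by
        rw [← hM, PySem.List.pyGet?_neg_ofNat _ 2 (by omega) (by simp)]
        simp
      rw [hg1, hg2, slice_to_neg_two, ← hpre]
      rw [PySem.List.slice_to_neg_one, PySem.List.pyGet?_neg_one]
      -- A-side characters
      have hN : (List.map (fun noun => sentenceArticle noun ++ " " ++ noun)
            (a :: b :: c :: rest)).map String.toList = M.map String.toList := by
        rw [hMdef, List.map_map, List.map_map]
        exact List.map_congr_left fun x _ => (fmt_toList x).symm
      have hopt : ∀ (o : Option String), (o.getD "").toList = (o.map String.toList).getD [] := by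
        intro o; cases o <;> rfl
      have hNlast : ((List.map (fun noun => sentenceArticle noun ++ " " ++ noun)
            (a :: b :: c :: rest)).getLast?.getD "").toList
          = ((M.map String.toList).getLast?).getD [] := by
        rw [hopt, ← List.getLast?_map, hN]
      have hNdrop : (List.map (fun noun => sentenceArticle noun ++ " " ++ noun)
            (a :: b :: c :: rest)).dropLast.map String.toList
          = (M.map String.toList).dropLast := by
        rw [List.map_dropLast, hN]
      have hMsplit : M.map String.toList
          = ((pre.map String.toList) ++ [y.toList]) ++ [z.toList] := by
        rw [← hM]; simp
      simp only [String.toList_append, PySem.Str.toList_join, hNdrop, hNlast, hMsplit]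
      rw [List.dropLast_concat, List.getLast?_concat]
      simp only [Option.getD_some]
      rw [if_pos hMne, if_pos (show M.length ≥ 2 by simp [hMdef])]
      have hstep : (fun (parts : List String) item => parts ++ [", "] ++ [item])
          = fun acc x => acc ++ [", ", x] := by
        funext p i; simp
      rw [hstep, PySem.List.foldl_append_eq_flatMap]
      have hrev : (([] ++ [z] ++ [" and "] ++ [y])
            ++ pre.reverse.flatMap (fun x => [", ", x])).reverse
          = pre.flatMap (fun x => [x, ", "]) ++ [y, " and ", z] := by
        rw [List.reverse_append, List.reverse_flatMap, List.reverse_reverse]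
        have hcomp : (List.reverse ∘ fun (x : String) => [", ", x]) = fun x => [x, ", "] := by
          funext x; rfl
        rw [hcomp]
        simp
      rw [hrev]
      simp only [List.map_append, List.map_flatMap, List.map_cons, List.map_nil,
                 show ("" : String).toList = [] from rfl, join_empty_sep, List.flatten_append,
                 List.flatten_cons, List.flatten_nil, List.append_nil]
      rw [← List.append_assoc, core_flat]
      simp

-- ===== VERDICT (by name: the statement is the Claim_ definition above) =====
theorem sentence_spec : Claim_equal_sentence := by
  intro nouns _ hpre
  exact sentence_spec' nouns hpre
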